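-- pv_equiv track=rewrite | github.com/spiri4/phytonjangogame | game/logic.py | do_continue
-- ===== SOURCE A (Python) =====
-- DEFAULT_TEXTS = [
--     "1", "2", "3", "4", "5", "6", "7", "8", "9",
--     "1", "1", "1", "2", "1", "3", "1", "4", "1",
--     "5", "1", "6", "1", "7", "1", "8", "1", "9",
-- ]
--
-- def check_row_empty(clicked: list, row_start: int) -> bool:
--     """Row is from row_start to row_start+8 (9 cells)."""
--     for f in range(row_start, min(row_start + 9, len(clicked))):
--         if clicked[f] != '2':
--             return False
--     return True
--
-- def do_continue(texts: list, clicked: list) -> tuple: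
--     """Remove full rows of crossed-out cells; then new board = remaining + active cell texts."""
--     texts = list(texts)
--     clicked = list(clicked)
--     n = len(texts)
--     if n < 9:
--         return texts, clicked
--
--     row_count = n // 9
--     for r in range(row_count - 1, -1, -1):
--         start = r * 9
--         if check_row_empty(clicked, start):
--             del texts[start:start + 9]
--             del clicked[start:start + 9]
--
--     if not texts:
--         return list(DEFAULT_TEXTS), ['0'] * len(DEFAULT_TEXTS)
--
--     active_texts = [texts[i] for i in range(len(clicked)) if clicked[i] != '2']
--     new_texts = texts + active_texts
--     new_clicked = list(clicked) + ['0'] * len(active_texts)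
--     return new_texts, new_clicked
-- ===== SOURCE B (Python) =====
-- DEFAULT_TEXTS = [
--     "1", "2", "3", "4", "5", "6", "7", "8", "9",
--     "1", "1", "1", "2", "1", "3", "1", "4", "1",
--     "5", "1", "6", "1", "7", "1", "8", "1", "9",
-- ]
--
-- def do_continue(texts: list, clicked: list) -> tuple:
--     """Single forward pass: keep each 9-cell row unless fully crossed out,
--     then append the still-active cells' texts with fresh '0' click states."""
--     n = len(texts)
--     if n < 9:
--         return list(texts), list(clicked)
--     full = (n // 9) * 9
--     keep_t, keep_c = [], []
--     for i in range(0, full, 9):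
--         row_c = clicked[i:i + 9]
--         if any(c != '2' for c in row_c):
--             keep_t += texts[i:i + 9]
--             keep_c += row_c
--     keep_t += texts[full:]
--     keep_c += clicked[full:]
--     if not keep_t:
--         return list(DEFAULT_TEXTS), ['0'] * len(DEFAULT_TEXTS)
--     active = [t for t, c in zip(keep_t, keep_c) if c != '2']
--     return keep_t + active, keep_c + ['0'] * len(active)
-- ===== Notes on version B (the rewrite author's own statement) =====
-- stated objective: alternative
-- what changed: Replaces the reverse loop of in-place slice deletions (each del shifts the remainder) plus an index-based comprehension by a single forward pass that rebuilds the kept rows once and zips the kept lists for the active cells.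
import Mathlib
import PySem

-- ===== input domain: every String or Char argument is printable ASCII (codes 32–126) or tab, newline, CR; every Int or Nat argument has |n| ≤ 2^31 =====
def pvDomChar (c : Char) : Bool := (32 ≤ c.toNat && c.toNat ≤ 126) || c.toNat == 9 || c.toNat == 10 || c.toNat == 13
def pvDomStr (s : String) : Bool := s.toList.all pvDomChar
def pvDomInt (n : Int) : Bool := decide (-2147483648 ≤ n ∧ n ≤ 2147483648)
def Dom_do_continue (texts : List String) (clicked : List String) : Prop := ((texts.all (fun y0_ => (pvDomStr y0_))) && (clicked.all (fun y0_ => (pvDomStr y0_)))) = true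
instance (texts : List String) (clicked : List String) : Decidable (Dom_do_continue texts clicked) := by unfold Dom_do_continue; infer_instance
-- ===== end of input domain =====

-- B replaces A's reverse loop of in-place slice deletions by one forward pass that
-- rebuilds the kept rows and zips the kept lists for the active cells (objective: alternative).

-- ===== PORT A =====
def pyDEFAULT_TEXTS : List String :=
  ["1", "2", "3", "4", "5", "6", "7", "8", "9",
   "1", "1", "1", "2", "1", "3", "1", "4", "1",
   "5", "1", "6", "1", "7", "1", "8", "1", "9"]

-- early-return 'for f in range(row_start, min(row_start+9, len(clicked)))' ≡ .all over that
-- range; indices are in range there, so clicked[f] is List.getD (exact)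
def check_row_empty (clicked : List String) (row_start : Nat) : Bool :=
  (List.range' row_start (min (row_start + 9) clicked.length - row_start)).all
    (fun f => clicked.getD f "" == "2")

-- body of A's 'for r in range(row_count-1, -1, -1)' loop; del xs[start:start+9] on the
-- nonnegative slice is take/drop (exact)
def stepA (st : List String × List String) (r : Nat) : List String × List String :=
  let start := r * 9
  if check_row_empty st.2 start then
    (st.1.take start ++ st.1.drop (start + 9), st.2.take start ++ st.2.drop (start + 9))
  else st

def do_continue (texts : List String) (clicked : List String) : List String × List String :=
  let n := texts.length
  if n < 9 then (texts, clicked)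
  else
    let row_count := n / 9
    -- range(row_count-1, -1, -1) = the row indices in reverse
    let p := (List.range row_count).reverse.foldl stepA (texts, clicked)
    if p.1 = [] then (pyDEFAULT_TEXTS, List.replicate pyDEFAULT_TEXTS.length "0")
    else
      -- '[texts[i] for i in range(len(clicked)) if clicked[i] != '2']'; inside Pre_ every
      -- evaluated texts[i] is in range, so List.getD is exact there
      let active := ((List.range p.2.length).filter (fun i => p.2.getD i "" != "2")).map
        (fun i => p.1.getD i "")
      (p.1 ++ active, p.2 ++ List.replicate active.length "0")

-- ===== PORT B =====
-- body of B's 'for i in range(0, full, 9)' loop, iterated over the row number j (i = j*9)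
def stepB (texts clicked : List String) (st : List String × List String) (j : Nat) :
    List String × List String :=
  let i := j * 9
  let rowC := (clicked.drop i).take 9
  if rowC.any (fun c => c != "2") then (st.1 ++ (texts.drop i).take 9, st.2 ++ rowC) else st

def do_continue_alt (texts : List String) (clicked : List String) : List String × List String :=
  let n := texts.length
  if n < 9 then (texts, clicked)
  else
    let full := (n / 9) * 9
    let kp := (List.range (n / 9)).foldl (stepB texts clicked) ([], [])
    let kt := kp.1 ++ texts.drop full
    let kc := kp.2 ++ clicked.drop full
    if kt = [] then (pyDEFAULT_TEXTS, List.replicate pyDEFAULT_TEXTS.length "0")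
    else
      let active := (kt.zip kc).filterMap (fun p => if p.2 != "2" then some p.1 else none)
      (kt ++ active, kc ++ List.replicate active.length "0")

-- ===== PRECONDITION & SPEC =====
-- Pre_ is exactly the set of inputs on which A returns: A raises IndexError precisely when
-- clicked extends past texts with some uncrossed (≠ '2') cell beyond the board, unless the
-- whole 9-aligned board is crossed out (then the default board is returned first).
def Pre_do_continue (texts : List String) (clicked : List String) : Prop :=
  texts.length < 9
  ∨ (clicked.drop texts.length).all (fun c => c == "2") = true
  ∨ (texts.length % 9 = 0 ∧ (clicked.take texts.length).all (fun c => c == "2") = true)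
instance (texts : List String) (clicked : List String) : Decidable (Pre_do_continue texts clicked) := by
  unfold Pre_do_continue; infer_instance

def pvWitness_do_continue : List String × List String :=
  (["1", "2", "3", "4", "5", "6", "7", "8", "9"],
   ["0", "2", "2", "2", "2", "2", "2", "2", "2"])

def Spec_do_continue (texts : List String) (clicked : List String) (out : List String × List String) : Prop := out = do_continue_alt texts clicked
instance (texts : List String) (clicked : List String) (out : List String × List String) : Decidable (Spec_do_continue texts clicked out) := by unfold Spec_do_continue; infer_instance

-- ===== CLAIM (what is proved, stated in full; the proofs are below) =====
def Claim_equal_do_continue : Prop := ∀ (texts : List String) (clicked : List String), Dom_do_continue texts clicked → Pre_do_continue texts clicked → Spec_do_continue texts clicked (do_continue texts clicked)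

-- ===== LEMMAS AND PROOFS =====

-- the rows kept by either program, built front-to-back (slices clamp like Python's)
def keptOf (texts clicked : List String) : Nat → List String × List String
  | 0 => ([], [])
  | r + 1 =>
    let p := keptOf texts clicked r
    if ((clicked.drop (r * 9)).take 9).any (fun c => c != "2") then
      (p.1 ++ (texts.drop (r * 9)).take 9, p.2 ++ (clicked.drop (r * 9)).take 9)
    else p

theorem bfold_eq_keptOf (texts clicked : List String) (rc : Nat) :
    (List.range rc).foldl (stepB texts clicked) ([], []) = keptOf texts clicked rc := by
  induction rc with
  | zero => rfl
  | succ r ih => simp [List.range_succ, List.foldl_append, ih, keptOf, stepB]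

theorem all_eq_not_any (l : List String) :
    (l.all (fun c => c == "2")) = !(l.any (fun c => c != "2")) := by
  induction l with
  | nil => rfl
  | cons x xs ih => simp [ih, bne]

theorem range'_all_getD (l : List String) (k s : Nat) :
    (List.range' s (min (s + k) l.length - s)).all (fun f => l.getD f "" == "2")
      = ((l.drop s).take k).all (fun c => c == "2") := by
  induction k generalizing s with
  | zero =>
    simp
  | succ k ih =>
    by_cases hs : s < l.length
    · have hm : min (s + (k + 1)) l.length - s = (min ((s + 1) + k) l.length - (s + 1)) + 1 := by
        omega
      have hd : l.drop s = l[s] :: l.drop (s + 1) := (List.getElem_cons_drop hs).symm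
      rw [hm, List.range'_succ, hd]
      simp only [List.all_cons, List.take_succ_cons, List.getD_eq_getElem l "" hs]
      rw [ih (s + 1)]
    · have hm : min (s + (k + 1)) l.length - s = 0 := by omega
      have hd : l.drop s = [] := List.drop_eq_nil_of_le (by omega)
      simp [hm, hd]

theorem check_eq (l : List String) (s : Nat) :
    check_row_empty l s = !(((l.drop s).take 9).any (fun c => c != "2")) := by
  unfold check_row_empty
  rw [range'_all_getD l 9 s, all_eq_not_any]

theorem keptOf_texts_append (T X C : List String) (r : Nat) (hT : r * 9 ≤ T.length) :
    keptOf (T ++ X) C r = keptOf T C r := by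
  induction r with
  | zero => rfl
  | succ r ih =>
    have hd : ((T ++ X).drop (r * 9)).take 9 = (T.drop (r * 9)).take 9 := by
      rw [List.drop_append_of_le_length (by omega), List.take_append_of_le_length (by
        simp; omega)]
    simp only [keptOf, hd, ih (by omega)]

theorem keptOf_clicked_take (T C : List String) (r m : Nat) (h : r * 9 ≤ m) :
    keptOf T (C.take m) r = keptOf T C r := by
  induction r with
  | zero => rfl
  | succ r ih =>
    have hd : ((C.take m).drop (r * 9)).take 9 = (C.drop (r * 9)).take 9 := by
      rw [List.drop_take, List.take_take]
      congr 1
      omega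
    simp only [keptOf, hd, ih (by omega)]

-- C with the r-th row slice deleted: prefix below r*9 is untouched
theorem take_delRow (C : List String) (m : Nat) :
    (C.take m ++ C.drop (m + 9)).take m = C.take m := by
  by_cases hm : m ≤ C.length
  · rw [List.take_append_of_le_length (by simp; omega)]
    simp
  · have h1 : C.take m = C := List.take_of_length_le (by omega)
    have h2 : C.drop (m + 9) = [] := List.drop_eq_nil_of_le (by omega)
    simp [h1, h2]

theorem drop_delRow (C : List String) (m : Nat) :
    (C.take m ++ C.drop (m + 9)).drop m = C.drop (m + 9) := by
  by_cases hm : m ≤ C.length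
  · rw [List.drop_append_of_le_length (by simp [min_eq_left hm])]
    simp
  · have hlen : C.length ≤ m := by omega
    have h1 : C.take m = C := List.take_of_length_le hlen
    have h2 : C.drop (m + 9) = [] := List.drop_eq_nil_of_le (by omega)
    rw [h1, h2, List.append_nil, List.drop_eq_nil_of_le hlen]

theorem aloopG (rc : Nat) : ∀ (T tT C : List String), T.length = rc * 9 →
    (List.range rc).reverse.foldl stepA (T ++ tT, C)
      = ((keptOf T C rc).1 ++ tT, (keptOf T C rc).2 ++ C.drop (rc * 9)) := by
  induction rc with
  | zero =>
    intro T tT C hT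
    have : T = [] := List.eq_nil_of_length_eq_zero (by omega)
    simp [this, keptOf]
  | succ rc ih =>
    intro T tT C hT
    set T' := T.take (rc * 9) with hT'
    set R := T.drop (rc * 9) with hR
    have hTsplit : T = T' ++ R := (List.take_append_drop _ _).symm
    have hlT' : T'.length = rc * 9 := by simp [hT']; omega
    have hlR : R.length = 9 := by simp [hR]; omega
    set rowC := (C.drop (rc * 9)).take 9 with hrowC
    rw [List.range_succ, List.reverse_append]
    simp only [List.reverse_singleton, List.singleton_append, List.foldl_cons]
    have hck : check_row_empty C (rc * 9) = !(rowC.any (fun c => c != "2")) := check_eq C _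
    have hstep : stepA (T ++ tT, C) rc
        = if rowC.any (fun c => c != "2")
          then (T ++ tT, C)
          else (T' ++ tT, C.take (rc * 9) ++ C.drop (rc * 9 + 9)) := by
      unfold stepA
      simp only [hck]
      by_cases hany : rowC.any (fun c => c != "2")
      · simp [hany]
      · simp only [hany, Bool.not_false, if_true, Bool.false_eq_true, if_false]
        congr 1
        rw [List.take_append_of_le_length (by omega),
          show rc * 9 + 9 = T.length by omega, List.drop_left, hT']
    rw [hstep]
    by_cases hany : rowC.any (fun c => c != "2")
    · -- row kept: state unchanged
      simp only [hany, if_true]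
      rw [show T ++ tT = T' ++ (R ++ tT) by rw [← List.append_assoc, ← hTsplit]]
      rw [ih T' (R ++ tT) C hlT']
      have hkept : keptOf T C (rc + 1)
          = ((keptOf T' C rc).1 ++ R, (keptOf T' C rc).2 ++ rowC) := by
      -- row rc of T is R; earlier rows only see the T' prefix
        have hrowT : (T.drop (rc * 9)).take 9 = R := by
          rw [← hR, List.take_of_length_le (by omega)]
        have hcongr : keptOf T C rc = keptOf T' C rc := by
          conv_lhs => rw [hTsplit]
          exact keptOf_texts_append T' R C rc (by omega)
        simp only [keptOf, ← hrowC, hany, if_true, hrowT, hcongr]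
      rw [hkept]
      have htail : C.drop (rc * 9) = rowC ++ C.drop ((rc + 1) * 9) := by
        rw [hrowC, show (rc + 1) * 9 = rc * 9 + 9 by ring, ← List.drop_drop]
        exact (List.take_append_drop _ _).symm
      rw [htail]
      simp [List.append_assoc]
    · -- row removed: both slices deleted
      simp only [hany, Bool.false_eq_true, if_false]
      rw [ih T' tT _ hlT']
      have hC2 : keptOf T' (C.take (rc * 9) ++ C.drop (rc * 9 + 9)) rc = keptOf T' C rc := by
        rw [← keptOf_clicked_take T' _ rc (rc * 9) (le_refl _), take_delRow,
          keptOf_clicked_take T' C rc (rc * 9) (le_refl _)]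
      have hkept : keptOf T C (rc + 1) = keptOf T' C rc := by
        have hcongr : keptOf T C rc = keptOf T' C rc := by
          conv_lhs => rw [hTsplit]
          exact keptOf_texts_append T' R C rc (by omega)
        simp only [keptOf, ← hrowC, hany, Bool.false_eq_true, if_false, hcongr]
      rw [hC2, hkept, drop_delRow, show (rc + 1) * 9 = rc * 9 + 9 by ring]

theorem keptOf_len_le (texts clicked : List String) (r : Nat) (h9 : r * 9 ≤ texts.length) :
    (keptOf texts clicked r).2.length ≤ (keptOf texts clicked r).1.length := by
  induction r with
  | zero => simp [keptOf]
  | succ r ih =>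
    simp only [keptOf]
    split
    · simp only [List.length_append, List.length_take, List.length_drop]
      have := ih (by omega)
      omega
    · exact ih (by omega)

theorem keptOf_len_eq (texts clicked : List String) (r : Nat)
    (hT : r * 9 ≤ texts.length) (hC : r * 9 ≤ clicked.length) :
    (keptOf texts clicked r).1.length = (keptOf texts clicked r).2.length := by
  induction r with
  | zero => rfl
  | succ r ih =>
    simp only [keptOf]
    split
    · simp only [List.length_append, List.length_take, List.length_drop,
        ih (by omega) (by omega)]
      omega
    · exact ih (by omega) (by omega)

theorem keptOf_nil (texts clicked : List String) (r : Nat)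
    (h : ∀ r' < r, ((clicked.drop (r' * 9)).take 9).any (fun c => c != "2") = false) :
    keptOf texts clicked r = ([], []) := by
  induction r with
  | zero => rfl
  | succ r ih =>
    simp only [keptOf, h r (by omega), Bool.false_eq_true, if_false]
    exact ih (fun r' hr' => h r' (by omega))

theorem all2_getD (l : List String) (m j : Nat)
    (hall : (l.drop m).all (fun c => c == "2") = true) (h1 : m ≤ j) (h2 : j < l.length) :
    l.getD j "" = "2" := by
  have hj : j - m < (l.drop m).length := by simp; omega
  have he : (l.drop m)[j - m] = l[j] := by
    rw [List.getElem_drop]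
    congr 1
    omega
  have hmem : l[j] ∈ l.drop m := he ▸ List.getElem_mem hj
  rw [List.all_eq_true] at hall
  have := hall _ hmem
  rw [List.getD_eq_getElem l "" h2]
  simpa using this

theorem row_all2 (clicked : List String) (n r' : Nat) (hr : r' * 9 + 9 ≤ n)
    (hall : (clicked.take n).all (fun c => c == "2") = true) :
    ((clicked.drop (r' * 9)).take 9).any (fun c => c != "2") = false := by
  rw [List.any_eq_false]
  intro c hc
  obtain ⟨j, hj, rfl⟩ := List.mem_iff_getElem.mp hc
  have hj' : j < min 9 (clicked.length - r' * 9) := by simpa using hj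
  have hj9 : j < 9 := by omega
  have hjl : r' * 9 + j < clicked.length := by omega
  have he : ((clicked.drop (r' * 9)).take 9)[j] = clicked[r' * 9 + j] := by
    rw [List.getElem_take, List.getElem_drop]
  have hlt : r' * 9 + j < (clicked.take n).length := by simp; omega
  have he2 : (clicked.take n)[r' * 9 + j] = clicked[r' * 9 + j] := List.getElem_take ..
  have hmem : clicked[r' * 9 + j] ∈ clicked.take n := he2 ▸ List.getElem_mem hlt
  rw [List.all_eq_true] at hall
  have := hall _ hmem
  rw [he]
  simpa using this

theorem active_eq (kt kc : List String)
    (h : ∀ i, kt.length ≤ i → i < kc.length → kc.getD i "" = "2") :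
    ((List.range kc.length).filter (fun i => kc.getD i "" != "2")).map
        (fun i => kt.getD i "")
      = (kt.zip kc).filterMap (fun p => if p.2 != "2" then some p.1 else none) := by
  induction kt generalizing kc with
  | nil =>
    simp
    intro a ha
    have h2 := h a (by simp) ha
    simpa [List.getD_eq_getElem?_getD] using h2
  | cons x xs ih =>
    cases kc with
    | nil => simp
    | cons y ys =>
      have h' : ∀ i, xs.length ≤ i → i < ys.length → ys.getD i "" = "2" := by
        intro i h1 h2
        have := h (i + 1) (by simp; omega) (by simp; omega)
        simpa using this
      simp only [List.length_cons, List.range_succ_eq_map, List.filter_cons,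
        List.filter_map, List.zip_cons_cons, List.filterMap_cons,
        List.getD_cons_zero, Function.comp_def, List.getD_cons_succ]
      by_cases hy : y = "2" <;>
        simp [hy, Function.comp_def] <;> simpa using ih ys h'

-- ===== VERDICT (by name: the statement is the Claim_ definition above) =====
theorem do_continue_spec : Claim_equal_do_continue := by
  intro texts clicked _ hpre
  unfold Spec_do_continue do_continue do_continue_alt
  by_cases hn : texts.length < 9
  · simp [hn]
  · simp only [hn, if_false]
    set n := texts.length with hn'
    set rc := n / 9 with hrc
    have hfit : rc * 9 ≤ n := by omega
    set T := texts.take (rc * 9) with hT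
    have hTsplit : texts = T ++ texts.drop (rc * 9) := (List.take_append_drop _ _).symm
    have hlT : T.length = rc * 9 := by simp [hT]; omega
    have hKc : keptOf T clicked rc = keptOf texts clicked rc := by
      conv_rhs => rw [hTsplit]
      exact (keptOf_texts_append T _ clicked rc (by omega)).symm
    have hA : (List.range rc).reverse.foldl stepA (texts, clicked)
        = ((keptOf texts clicked rc).1 ++ texts.drop (rc * 9),
           (keptOf texts clicked rc).2 ++ clicked.drop (rc * 9)) := by
      conv_lhs => rw [hTsplit]
      rw [aloopG rc T _ clicked hlT, hKc]
    rw [hA, bfold_eq_keptOf]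
    set K := keptOf texts clicked rc with hK
    set kt := K.1 ++ texts.drop (rc * 9) with hkt
    set kc := K.2 ++ clicked.drop (rc * 9) with hkc
    by_cases hempty : kt = []
    · simp [hempty]
    · simp only [hempty, if_false]
      have hact : ∀ i, kt.length ≤ i → i < kc.length → kc.getD i "" = "2" := by
        rcases hpre with hlt | htail | hfull
        · omega
        · by_cases hlc : clicked.length ≤ n
          · -- clicked not longer than texts: kc is no longer than kt
            intro i h1 h2
            have hle := keptOf_len_le texts clicked rc (by omega)
            rw [← hK] at hle
            have : kc.length ≤ kt.length := by
              simp only [hkt, hkc, List.length_append, List.length_drop]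
              omega
            omega
          · -- clicked longer: the overhang of kc is clicked's tail beyond texts, all "2"
            intro i h1 h2
            have hleq := keptOf_len_eq texts clicked rc (by omega) (by omega)
            rw [← hK] at hleq
            have hK2 : K.2.length ≤ i := by
              simp only [hkt, List.length_append, List.length_drop] at h1
              omega
            have hgd : kc.getD i "" = clicked.getD (rc * 9 + (i - K.2.length)) "" := by
              rw [List.getD_eq_getElem?_getD, hkc, List.getElem?_append_right hK2,
                List.getElem?_drop, ← List.getD_eq_getElem?_getD]
            rw [hgd]
            have hlen2 : i - K.2.length < clicked.length - rc * 9 := by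
              simp only [hkc, List.length_append, List.length_drop] at h2
              omega
            refine all2_getD clicked n _ htail (by
              simp only [hkt, List.length_append, List.length_drop] at h1
              omega) (by omega)
        · -- whole board crossed out and 9-aligned: kt = [], contradiction
          exfalso
          apply hempty
          have hrceq : rc * 9 = n := by omega
          have hnil : K = ([], []) := by
            rw [hK]
            exact keptOf_nil texts clicked rc
              (fun r' hr' => row_all2 clicked n r' (by omega) hfull.2)
          rw [hkt, hnil, hrceq, hn']
          simp
      rw [active_eq kt kc hact]
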